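-- pv_equiv track=rewrite | github.com/aiguy110/advent-of-code-2020 | day_06/solution2.py | unanimous_chars_from_group
-- ===== SOURCE A (Python) =====
-- def unanimous_chars_from_group(group):
--     unanimous_chars = []
--     for char in group[0]:
--         unanimous = True
--         for answer_string in group:
--             if char not in answer_string:
--                 unanimous = False
--                 break
--         if unanimous:
--             unanimous_chars.append( char )
--
--     return unanimous_chars
-- ===== SOURCE B (Python) =====
-- def unanimous_chars_from_group(group):
--     common = set(group[0])
--     for answer_string in group[1:]:
--         common &= set(answer_string)
--     return [c for c in group[0] if c in common]
-- ===== Notes on version B (the rewrite author's own statement) =====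
-- stated objective: simpler
-- what changed: Replaces A's nested per-character scan of every answer string by one set-intersection reduce over the remaining answers plus a single filtering pass over group[0].
import Mathlib
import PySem

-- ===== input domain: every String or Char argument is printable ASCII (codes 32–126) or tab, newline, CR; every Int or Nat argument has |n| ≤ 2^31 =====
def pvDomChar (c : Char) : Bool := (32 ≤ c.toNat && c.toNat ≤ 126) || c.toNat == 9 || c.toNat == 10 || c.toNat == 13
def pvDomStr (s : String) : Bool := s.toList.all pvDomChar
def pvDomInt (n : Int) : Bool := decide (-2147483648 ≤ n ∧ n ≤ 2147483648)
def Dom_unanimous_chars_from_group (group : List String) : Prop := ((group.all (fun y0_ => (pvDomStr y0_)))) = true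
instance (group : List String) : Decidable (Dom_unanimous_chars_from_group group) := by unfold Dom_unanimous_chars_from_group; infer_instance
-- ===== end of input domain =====

-- B replaces A's per-character scan of the whole group by one set-intersection fold over the
-- remaining answers followed by a single filtering pass over group[0] (simpler; same order/duplicates).

-- ===== PORT A =====
-- inner 'for answer_string in group: if char not in answer_string: unanimous = False; break'
def pvInnerA (char : Char) : List String → Bool
  | [] => true
  | s :: rest => if ¬ (char ∈ s.toList) then false else pvInnerA char rest

def unanimous_chars_from_group (group : List String) : List String :=
  let g0 := (PySem.List.pyGet? group 0).getD ""   -- group[0]; none (IndexError) excluded by Pre_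
  g0.toList.foldl
    (fun unanimous_chars char =>
      if pvInnerA char group then unanimous_chars ++ [String.mk [char]] else unanimous_chars)
    []

-- ===== PORT B =====
def unanimous_chars_from_group_alt (group : List String) : List String :=
  let g0 := (PySem.List.pyGet? group 0).getD ""   -- group[0]; none (IndexError) excluded by Pre_
  let common : List Char :=
    (PySem.List.slice group (some 1) none).foldl
      (fun common s => common.filter (fun c => decide (c ∈ s.toList)))
      (PySem.Set.ofList g0.toList)
  (g0.toList.filter (fun c => decide (c ∈ common))).map (fun c => String.mk [c])

-- ===== PRECONDITION & SPEC =====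
-- Pre_ excludes only the empty group, on which A raises IndexError at group[0].
def Pre_unanimous_chars_from_group (group : List String) : Prop := group ≠ []
instance (group : List String) : Decidable (Pre_unanimous_chars_from_group group) := by
  unfold Pre_unanimous_chars_from_group; infer_instance
def pvWitness_unanimous_chars_from_group : List String := ["abc", "cab"]

def Spec_unanimous_chars_from_group (group : List String) (out : List String) : Prop := out = unanimous_chars_from_group_alt group
instance (group : List String) (out : List String) : Decidable (Spec_unanimous_chars_from_group group out) := by unfold Spec_unanimous_chars_from_group; infer_instance

-- ===== CLAIM (what is proved, stated in full; the proofs are below) =====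
def Claim_equal_unanimous_chars_from_group : Prop := ∀ (group : List String), Dom_unanimous_chars_from_group group → Pre_unanimous_chars_from_group group → Spec_unanimous_chars_from_group group (unanimous_chars_from_group group)

-- ===== LEMMAS AND PROOFS =====

-- A's inner loop decides 'char is in every answer string'
theorem pvInnerA_eq (char : Char) (l : List String) :
    pvInnerA char l = decide (∀ s ∈ l, char ∈ s.toList) := by
  induction l with
  | nil => simp [pvInnerA]
  | cons s rest ih => by_cases h : char ∈ s.toList <;> simp [pvInnerA, h, ih]

-- membership in B's intersection fold
theorem mem_common_fold (c : Char) (l : List String) (init : List Char) :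
    (c ∈ l.foldl (fun common s => common.filter (fun c => decide (c ∈ s.toList))) init)
      ↔ (c ∈ init ∧ ∀ s ∈ l, c ∈ s.toList) := by
  induction l generalizing init with
  | nil => simp
  | cons s rest ih => simp [List.foldl_cons, ih]; tauto

theorem unanimous_chars_from_group_spec : Claim_equal_unanimous_chars_from_group := by
  intro group _ hpre
  unfold Spec_unanimous_chars_from_group unanimous_chars_from_group unanimous_chars_from_group_alt
  obtain ⟨g0, rest, rfl⟩ : ∃ h t, group = h :: t := by
    cases group with
    | nil => exact absurd rfl hpre
    | cons h t => exact ⟨h, t, rfl⟩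
  have hg : (PySem.List.pyGet? (g0 :: rest) 0).getD "" = g0 := by
    simp [PySem.List.pyGet?, PySem.List.pyIdx?]
  rw [PySem.List.slice_from_one]
  simp only [hg, List.tail_cons]
  rw [PySem.List.foldl_append_if]
  simp only [List.nil_append]
  refine congrArg (List.map fun c => String.mk [c]) (List.filter_congr ?_)
  intro c hc
  rw [pvInnerA_eq]
  simp only [decide_eq_decide, mem_common_fold, PySem.Set.mem_ofList, List.mem_cons,
    forall_eq_or_imp]

-- ===== VERDICT (by name: the statement is the Claim_ definition above) =====
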